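-- pv_equiv track=rewrite | github.com/sungjin0757/Algorithm | STUDY/naturalmerge.py | makeRun
-- ===== SOURCE A (Python) =====
-- def makeRun(a,n):
--     run=[]
--     tmp=[]
--     for i in range(n):
--         if a[i]<=a[i+1]:
--             tmp.append(a[i])
--         else:
--             tmp.append(a[i])
--             run.append(tmp)
--             tmp=[]
--         if i==n-1:
--             tmp.append(a[i+1])
--             run.append(tmp)
--
--     return run
-- ===== SOURCE B (Python) =====
-- def makeRun(a, n):
--     if n < 1:
--         return []
--     breaks = [i for i in range(n) if a[i] > a[i + 1]]
--     runs = []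
--     start = 0
--     for b in breaks:
--         runs.append(a[start:b + 1])
--         start = b + 1
--     runs.append(a[start:n + 1])
--     return runs
-- ===== Notes on version B (the rewrite author's own statement) =====
-- stated objective: alternative
-- what changed: Replaced A's single pass that grows a temporary run list and flushes it at each descent (with a special last-iteration step) by a two-pass scheme: first compute the table of descent boundaries i with a[i] > a[i+1], then build the runs by slicing the array between consecutive boundaries.
import Mathlib
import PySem

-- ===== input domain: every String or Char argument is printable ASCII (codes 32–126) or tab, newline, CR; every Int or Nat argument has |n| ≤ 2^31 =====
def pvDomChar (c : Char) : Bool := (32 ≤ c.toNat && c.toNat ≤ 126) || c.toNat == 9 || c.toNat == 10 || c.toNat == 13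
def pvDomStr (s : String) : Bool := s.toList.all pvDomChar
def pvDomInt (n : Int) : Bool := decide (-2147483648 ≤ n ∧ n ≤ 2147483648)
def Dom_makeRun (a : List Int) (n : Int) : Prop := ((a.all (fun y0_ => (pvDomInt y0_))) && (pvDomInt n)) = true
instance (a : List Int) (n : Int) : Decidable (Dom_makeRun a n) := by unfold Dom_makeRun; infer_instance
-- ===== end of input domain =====

-- B computes the descent boundaries first and then slices the array at them (two passes),
-- instead of A's single pass with a growing temporary run accumulator (objective: alternative).


-- ===== PORT A =====
-- body of A's for-loop (a[i]/a[i+1] via pyGetD: in range under Pre_, where Python does not raise)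
def makeRunStep (a : List Int) (n : Int) (s : List (List Int) × List Int) (i : Int) :
    List (List Int) × List Int :=
  let ai := PySem.List.pyGetD a i 0
  let ai1 := PySem.List.pyGetD a (i + 1) 0
  let s1 := if ai ≤ ai1 then (s.1, s.2 ++ [ai]) else (s.1 ++ [s.2 ++ [ai]], ([] : List Int))
  if i = n - 1 then (s1.1 ++ [s1.2 ++ [ai1]], s1.2 ++ [ai1]) else s1

def makeRun (a : List Int) (n : Int) : List (List Int) :=
  ((PySem.List.pyRange 0 n 1).foldl (makeRunStep a n) ([], [])).1

-- ===== PORT B =====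
def makeRun_alt (a : List Int) (n : Int) : List (List Int) :=
  if n < 1 then []
  else
    let breaks := (PySem.List.pyRange 0 n 1).filter
      (fun i => decide (PySem.List.pyGetD a i 0 > PySem.List.pyGetD a (i + 1) 0))
    let st := breaks.foldl
      (fun (s : List (List Int) × Int) b =>
        (s.1 ++ [PySem.List.slice a (some s.2) (some (b + 1))], b + 1))
      (([] : List (List Int)), (0 : Int))
    st.1 ++ [PySem.List.slice a (some st.2) (some (n + 1))]

-- ===== PRECONDITION & SPEC =====
-- Pre_ excludes exactly the inputs where A raises IndexError: n ≥ 1 but a has fewer than n+1 elements.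
def Pre_makeRun (a : List Int) (n : Int) : Prop := n < 1 ∨ n + 1 ≤ (a.length : Int)
instance (a : List Int) (n : Int) : Decidable (Pre_makeRun a n) := by unfold Pre_makeRun; infer_instance
def pvWitness_makeRun : List Int × Int := ([3, 1, 2, 2, 0], 4)

def Spec_makeRun (a : List Int) (n : Int) (out : List (List Int)) : Prop := out = makeRun_alt a n
instance (a : List Int) (n : Int) (out : List (List Int)) : Decidable (Spec_makeRun a n out) := by unfold Spec_makeRun; infer_instance

-- ===== CLAIM (what is proved, stated in full; the proofs are below) =====
def Claim_equal_makeRun : Prop := ∀ (a : List Int) (n : Int), Dom_makeRun a n → Pre_makeRun a n → Spec_makeRun a n (makeRun a n)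

-- ===== LEMMAS AND PROOFS =====

-- extending a contiguous segment of a by its next element
lemma seg_snoc (a : List Int) (s k : Nat) (hs : s ≤ k) (hk : k < a.length) :
    (a.drop s).take (k - s) ++ [a.getD k 0] = (a.drop s).take (k + 1 - s) := by
  rw [Nat.succ_sub hs, List.take_add_one]
  congr 1
  have : (a.drop s)[k - s]? = some (a.getD k 0) := by
    rw [List.getElem?_drop, Nat.add_sub_cancel' hs, List.getElem?_eq_getElem hk]
    simp [List.getD, List.getElem?_eq_getElem hk]
  simp [this]

-- invariant: A's loop over range(k) (k ≤ n-1, so the i==n-1 branch never fires) produces the same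
-- closed runs as B's fold over the breaks below k, with tmp the still-open segment a[s:k]
lemma loop_inv (a : List Int) (n : Int) (m : Nat) (hm : (m : Int) = n)
    (hlen : m + 1 ≤ a.length) :
    ∀ k : Nat, k ≤ m - 1 →
      ∃ (R : List (List Int)) (s : Nat), s ≤ k ∧
        (((PySem.List.pyRange 0 (k : Int) 1).filter
            (fun i => decide (PySem.List.pyGetD a i 0 > PySem.List.pyGetD a (i + 1) 0))).foldl
          (fun (st : List (List Int) × Int) b =>
            (st.1 ++ [PySem.List.slice a (some st.2) (some (b + 1))], b + 1))
          (([] : List (List Int)), (0 : Int))) = (R, (s : Int)) ∧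
        (PySem.List.pyRange 0 (k : Int) 1).foldl (makeRunStep a n) ([], []) =
          (R, (a.drop s).take (k - s)) := by
  intro k
  induction k with
  | zero =>
    intro _
    exact ⟨[], 0, le_refl _, by simp, by simp⟩
  | succ k ih =>
    intro hk1
    obtain ⟨R, s, hs, hB, hA⟩ := ih (by omega)
    have hklen : k < a.length := by omega
    have hrange : PySem.List.pyRange 0 ((k + 1 : Nat) : Int) 1 =
        PySem.List.pyRange 0 (k : Int) 1 ++ [(k : Int)] := by
      push_cast
      exact PySem.List.pyRange_one_succ_right (by positivity)
    have hai : PySem.List.pyGetD a (k : Int) 0 = a.getD k 0 := PySem.List.pyGetD_natCast a k 0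
    have hai1 : PySem.List.pyGetD a ((k : Int) + 1) 0 = a.getD (k + 1) 0 := by
      rw [show ((k : Int) + 1) = ((k + 1 : Nat) : Int) by push_cast; ring]
      exact PySem.List.pyGetD_natCast a (k + 1) 0
    have hne : ((k : Int)) ≠ n - 1 := by omega
    by_cases hle : a.getD k 0 ≤ a.getD (k + 1) 0
    · refine ⟨R, s, by omega, ?_, ?_⟩
      · rw [hrange, List.filter_append, List.foldl_append, hB]
        simp only [List.filter_cons, List.filter_nil]
        rw [if_neg (by simp only [hai, hai1, decide_eq_true_eq, not_lt]; exact hle)]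
        simp
      · rw [hrange, List.foldl_append, hA]
        simp only [List.foldl_cons, List.foldl_nil, makeRunStep, hai, hai1, if_pos hle,
          if_neg hne]
        rw [seg_snoc a s k hs hklen]
    · refine ⟨R ++ [(a.drop s).take (k + 1 - s)], k + 1, le_refl _, ?_, ?_⟩
      · rw [hrange, List.filter_append, List.foldl_append, hB]
        simp only [List.filter_cons, List.filter_nil]
        rw [if_pos (by simp only [hai, hai1, decide_eq_true_eq]; exact lt_of_not_ge hle)]
        simp only [List.foldl_cons, List.foldl_nil]
        rw [show ((k : Int) + 1) = ((k + 1 : Nat) : Int) by push_cast; ring,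
          PySem.List.slice_natCast]
      · rw [hrange, List.foldl_append, hA]
        simp only [List.foldl_cons, List.foldl_nil, makeRunStep, if_neg hle, if_neg hne,
          hai, hai1]
        rw [seg_snoc a s k hs hklen]
        simp

-- ===== VERDICT (by name: the statement is the Claim_ definition above) =====
theorem makeRun_spec : Claim_equal_makeRun := by
  intro a n _ hpre
  unfold Spec_makeRun
  rcases lt_or_ge n 1 with hn | hn
  · simp [makeRun, makeRun_alt, hn, PySem.List.pyRange_zero, Int.toNat_of_nonpos (by omega : n ≤ 0)]
  · have hlen' : n + 1 ≤ (a.length : Int) := by rcases hpre with h | h; omega; exact h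
    set m := n.toNat with hmdef
    have hm : (m : Int) = n := Int.toNat_of_nonneg (by omega)
    have hm1 : 1 ≤ m := by omega
    have hlen : m + 1 ≤ a.length := by omega
    obtain ⟨R, s, hs, hB, hA⟩ := loop_inv a n m hm hlen (m - 1) le_rfl
    have hrange : PySem.List.pyRange 0 n 1 =
        PySem.List.pyRange 0 ((m - 1 : Nat) : Int) 1 ++ [((m - 1 : Nat) : Int)] := by
      rw [show n = ((m - 1 : Nat) : Int) + 1 by push_cast [hm1]; omega]
      exact PySem.List.pyRange_one_succ_right (by positivity)
    have hai : PySem.List.pyGetD a ((m - 1 : Nat) : Int) 0 = a.getD (m - 1) 0 :=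
      PySem.List.pyGetD_natCast a (m - 1) 0
    have hai1 : PySem.List.pyGetD a (((m - 1 : Nat) : Int) + 1) 0 = a.getD m 0 := by
      rw [show (((m - 1 : Nat) : Int) + 1) = ((m : Nat) : Int) by push_cast [hm1]; omega]
      exact PySem.List.pyGetD_natCast a m 0
    have hlast : ((m - 1 : Nat) : Int) = n - 1 := by push_cast [hm1]; omega
    have hm1lt : m - 1 < a.length := by omega
    have hmlt : m < a.length := by omega
    have hsm : s ≤ m - 1 := hs
    rw [makeRun, makeRun_alt, if_neg (by omega)]
    simp only [hrange, List.filter_append, List.foldl_append, List.filter_cons,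
      List.filter_nil, hA, hB]
    by_cases hle : a.getD (m - 1) 0 ≤ a.getD m 0
    · rw [if_neg (by simp only [hai, hai1, decide_eq_true_eq, not_lt]; exact hle)]
      simp only [List.foldl_cons, List.foldl_nil, makeRunStep, hai, hai1, if_pos hle,
        if_pos hlast]
      rw [seg_snoc a s (m - 1) hsm hm1lt]
      rw [show m - 1 + 1 = m by omega]
      rw [seg_snoc a s m (by omega) hmlt]
      rw [show n + 1 = ((m + 1 : Nat) : Int) by push_cast; omega,
        show (s : Int) = ((s : Nat) : Int) by rfl, PySem.List.slice_natCast]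
    · rw [if_pos (by simp only [hai, hai1, decide_eq_true_eq]; exact lt_of_not_ge hle)]
      simp only [List.foldl_cons, List.foldl_nil, makeRunStep, hai, hai1, if_neg hle,
        if_pos hlast]
      rw [seg_snoc a s (m - 1) hsm hm1lt]
      rw [show m - 1 + 1 = m by omega]
      rw [show ((m - 1 : Nat) : Int) + 1 = ((m : Nat) : Int) by push_cast [hm1]; omega,
        PySem.List.slice_natCast]
      rw [show n + 1 = ((m + 1 : Nat) : Int) by push_cast; omega, PySem.List.slice_natCast]
      have : (a.drop m).take (m + 1 - m) = [a.getD m 0] := by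
        have := seg_snoc a m m le_rfl hmlt
        simpa using this.symm
      rw [this]
      simp
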